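-- pv_equiv track=rewrite | github.com/anu357753/Project_plagiarism | make_hash.py | make_hashes
-- ===== SOURCE A (Python) =====
-- def make_hashes(string1):
-- 	word_list=[]
-- 	hash_list=[]
-- 	for i in range(len(string1)-5):
-- 		word_list.append(string1[i:i+5])
--
-- 	for word in word_list:
-- 		hash_num=0
-- 		for let in range(len(word)):
-- 			hash_num+=(ord(word[let])*(5**((len(word))-let)))
-- 			hash_num2=hash_num%10007
-- 		hash_list.append(hash_num2)
--
-- 	return hash_list
-- ===== SOURCE B (Python) =====
-- def make_hashes(string1):
--     n = len(string1) - 5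
--     if n <= 0:
--         return []
--     h = 0
--     for j in range(5):
--         h += ord(string1[j]) * 5 ** (5 - j)
--     h %= 10007
--     out = [h]
--     for i in range(n - 1):
--         h = (5 * (h - ord(string1[i]) * 3125) + ord(string1[i + 5]) * 5) % 10007
--         out.append(h)
--     return out
-- ===== Notes on version B (the rewrite author's own statement) =====
-- stated objective: faster
-- what changed: Replaces A's per-window work (building a list of 5-char slices, then re-summing ord(c)*5**(5-j) over each window from scratch) with a single incremental pass that hashes the first window once and then slides, maintaining one running hash via h = (5*(h - ord(s[i])*3125) + ord(s[i+5])*5) % 10007.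
import Mathlib
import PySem

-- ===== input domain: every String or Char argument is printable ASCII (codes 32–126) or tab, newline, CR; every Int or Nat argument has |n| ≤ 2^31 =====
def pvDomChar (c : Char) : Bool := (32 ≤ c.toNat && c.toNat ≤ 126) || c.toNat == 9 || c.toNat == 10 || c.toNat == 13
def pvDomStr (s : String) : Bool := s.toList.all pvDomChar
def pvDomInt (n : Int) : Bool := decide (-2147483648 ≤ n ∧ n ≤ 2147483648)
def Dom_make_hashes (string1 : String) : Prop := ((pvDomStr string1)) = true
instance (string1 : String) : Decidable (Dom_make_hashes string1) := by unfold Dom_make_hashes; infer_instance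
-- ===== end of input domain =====

-- B replaces A's per-window recomputation of the 5-term hash by a single rolling-hash pass updating one running value per step (objective: faster; a timing run measured B ≥ 1.5× faster).

-- ord(c) (strings handled as code-point lists)
def pyOrd (c : Char) : Int := (c.toNat : Int)

-- ===== PORT A =====
-- transliteration of Source A: build word_list of the slices s[i:i+5], then for each word sum
-- ord(word[let])*5**(len(word)-let), keeping hash_num2 = running sum % 10007; append hash_num2
def make_hashes (string1 : String) : List Int :=
  let cs := string1.toList
  let word_list : List (List Char) :=
    (PySem.List.pyRange 0 ((cs.length : Int) - 5) 1).foldl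
      (fun acc i => acc ++ [PySem.List.slice cs (some i) (some (i + 5))]) []
  word_list.foldl
    (fun hash_list word =>
      let st :=
        (PySem.List.pyRange 0 (word.length : Int) 1).foldl
          (fun (p : Int × Int) lt =>
            let hash_num := p.1 + pyOrd (PySem.List.pyGetD word lt 'A') * 5 ^ (((word.length : Int) - lt).toNat)
            (hash_num, PySem.Int.mod hash_num 10007))
          (0, 0)
      hash_list ++ [st.2])
    []

-- ===== PORT B =====
-- transliteration of Source B: hash the first 5-char window once, then slide, maintaining
-- h = (5*(h - ord(s[i])*3125) + ord(s[i+5])*5) % 10007 and appending h each step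
def make_hashes_alt (string1 : String) : List Int :=
  let cs := string1.toList
  let n : Int := (cs.length : Int) - 5
  if n ≤ 0 then []
  else
    let h0 := PySem.Int.mod
      ((PySem.List.pyRange 0 5 1).foldl
        (fun h j => h + pyOrd (PySem.List.pyGetD cs j 'A') * 5 ^ ((5 - j).toNat)) 0) 10007
    ((PySem.List.pyRange 0 (n - 1) 1).foldl
      (fun (st : List Int × Int) i =>
        let h := PySem.Int.mod
          (5 * (st.2 - pyOrd (PySem.List.pyGetD cs i 'A') * 3125) + pyOrd (PySem.List.pyGetD cs (i + 5) 'A') * 5) 10007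
        (st.1 ++ [h], h))
      ([h0], h0)).1

-- ===== PRECONDITION & SPEC =====
def Spec_make_hashes (string1 : String) (out : List Int) : Prop := out = make_hashes_alt string1
instance (string1 : String) (out : List Int) : Decidable (Spec_make_hashes string1 out) := by unfold Spec_make_hashes; infer_instance

-- ===== CLAIM (what is proved, stated in full; the proofs are below) =====
def Claim_equal_make_hashes : Prop := ∀ (string1 : String), Dom_make_hashes string1 → Spec_make_hashes string1 (make_hashes string1)

-- ===== LEMMAS AND PROOFS =====

-- ord of cs[k] (used only at in-range indices)
def oAt (cs : List Char) (k : Nat) : Int := pyOrd (cs.getD k 'A')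

-- the hash sum of the window starting at k, before the final mod
def wSum (cs : List Char) (k : Nat) : Int :=
  oAt cs k * 3125 + oAt cs (k+1) * 625 + oAt cs (k+2) * 125 + oAt cs (k+3) * 25 + oAt cs (k+4) * 5

-- the common characterisation both ports are reduced to
def hashSpec (cs : List Char) : List Int :=
  (List.range (cs.length - 5)).map (fun k => wSum cs k % 10007)

theorem pyRange_five : PySem.List.pyRange 0 (5:Int) 1 = [0,1,2,3,4] := by
  rw [PySem.List.pyRange_one_cons (by norm_num), PySem.List.pyRange_one_cons (by norm_num),
      PySem.List.pyRange_one_cons (by norm_num), PySem.List.pyRange_one_cons (by norm_num),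
      PySem.List.pyRange_one_cons (by norm_num), PySem.List.pyRange_one_eq_nil (by norm_num)]
  norm_num

-- A's inner loop evaluated on a 5-character word
theorem innerA (a b c d e : Char) :
    ((PySem.List.pyRange 0 (([a,b,c,d,e].length : Nat) : Int) 1).foldl
      (fun (p : Int × Int) lt =>
        (p.1 + pyOrd (PySem.List.pyGetD [a,b,c,d,e] lt 'A') * 5 ^ ((((([a,b,c,d,e].length : Nat)) : Int) - lt).toNat),
         PySem.Int.mod (p.1 + pyOrd (PySem.List.pyGetD [a,b,c,d,e] lt 'A') * 5 ^ ((((([a,b,c,d,e].length : Nat)) : Int) - lt).toNat)) 10007))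
      (0, 0)).2
    = (pyOrd a * 3125 + pyOrd b * 625 + pyOrd c * 125 + pyOrd d * 25 + pyOrd e * 5) % 10007 := by
  norm_num [pyRange_five, List.foldl,
    PySem.Int.mod_eq_emod_of_pos (by norm_num : (0:Int) < 10007), pysem,
    show Int.toNat 5 = 5 from rfl, show Int.toNat 4 = 4 from rfl,
    show Int.toNat 3 = 3 from rfl, show Int.toNat 2 = 2 from rfl]

-- the window s[k:k+5] elementwise
theorem windowEq (cs : List Char) (k : Nat) (h : k + 5 ≤ cs.length) :
    (cs.drop k).take 5 = [cs.getD k 'A', cs.getD (k+1) 'A', cs.getD (k+2) 'A', cs.getD (k+3) 'A', cs.getD (k+4) 'A'] := by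
  have h0 : k < cs.length := by omega
  have h1 : k+1 < cs.length := by omega
  have h2 : k+2 < cs.length := by omega
  have h3 : k+3 < cs.length := by omega
  have h4 : k+4 < cs.length := by omega
  apply List.ext_getElem
  · simp; omega
  · intro i hi1 hi2
    have hi : i < 5 := by simp at hi1; omega
    simp only [List.getElem_take, List.getElem_drop]
    interval_cases i <;> simp [h0, h1, h2, h3, h4]

theorem make_hashes_eq_spec (s : String) : make_hashes s = hashSpec s.toList := by
  simp only [make_hashes]
  rw [PySem.List.foldl_append_singleton_eq_map, PySem.List.foldl_append_singleton_eq_map]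
  rw [PySem.List.pyRange_one, hashSpec]
  simp only [List.map_map]
  have hM : ((s.toList.length : Int) - 5 - 0).toNat = s.toList.length - 5 := by omega
  rw [hM]
  simp only [List.nil_append, List.map_map]
  apply List.map_congr_left
  intro k hk
  simp only [List.mem_range] at hk
  simp only [Function.comp]
  rw [show ((0:Int) + (k:Nat)) = ((k:Nat):Int) by ring]
  rw [show ((k:Int) + 5) = ((k:Int) + ((5:Nat):Int)) by norm_num, PySem.List.slice_natCast_add]
  rw [windowEq s.toList k (by omega)]
  rw [innerA]
  simp [wSum, oAt]

-- B's first-window loop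
theorem firstWin (cs : List Char) :
    (PySem.List.pyRange 0 5 1).foldl
      (fun h j => h + pyOrd (PySem.List.pyGetD cs j 'A') * 5 ^ ((5 - j).toNat)) 0 = wSum cs 0 := by
  norm_num [pyRange_five, List.foldl, pysem, wSum, oAt,
    show Int.toNat 5 = 5 from rfl, show Int.toNat 4 = 4 from rfl,
    show Int.toNat 3 = 3 from rfl, show Int.toNat 2 = 2 from rfl]

-- the exact rolling step of B, as plain arithmetic
theorem rollS (cs : List Char) (i : Nat) :
    5 * (wSum cs i - oAt cs i * 3125) + oAt cs (i+5) * 5 = wSum cs (i+1) := by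
  have h2 : i+1+1 = i+2 := by omega
  have h3 : i+1+2 = i+3 := by omega
  have h4 : i+1+3 = i+4 := by omega
  have h5 : i+1+4 = i+5 := by omega
  simp only [wSum, h2, h3, h4, h5]; ring

-- one slide of B's loop turns the hash of window i into the hash of window i+1
theorem rollHash (cs : List Char) (i : Nat) :
    PySem.Int.mod
      (5 * (wSum cs i % 10007 - pyOrd (PySem.List.pyGetD cs (i : Int) 'A') * 3125)
        + pyOrd (PySem.List.pyGetD cs ((i : Int) + 5) 'A') * 5) 10007
    = wSum cs (i+1) % 10007 := by
  rw [PySem.Int.mod_eq_emod_of_pos (by norm_num : (0:Int) < 10007)]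
  rw [show ((i:Int)+5) = ((i+5 : Nat):Int) by push_cast; ring]
  simp only [PySem.List.pyGetD_natCast]
  have h := rollS cs i
  simp only [oAt] at h
  rw [← h]
  generalize wSum cs i = W
  omega

-- B's sliding loop, by induction on the number of remaining windows
theorem Bloop (cs : List Char) (m : Nat) :
    ∀ (k i : Nat) (acc : List Int), i + k + 1 = m →
    (PySem.List.pyRange (i:Int) ((m:Int)-1) 1).foldl
      (fun (st : List Int × Int) j =>
        (st.1 ++ [PySem.Int.mod (5 * (st.2 - pyOrd (PySem.List.pyGetD cs j 'A') * 3125)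
            + pyOrd (PySem.List.pyGetD cs (j + 5) 'A') * 5) 10007],
         PySem.Int.mod (5 * (st.2 - pyOrd (PySem.List.pyGetD cs j 'A') * 3125)
            + pyOrd (PySem.List.pyGetD cs (j + 5) 'A') * 5) 10007))
      (acc, wSum cs i % 10007)
    = (acc ++ (List.range k).map (fun t => wSum cs (i+1+t) % 10007), wSum cs (i+k) % 10007) := by
  intro k
  induction k with
  | zero =>
    intro i acc hik
    rw [PySem.List.pyRange_one_eq_nil (by omega)]
    simp
  | succ k ih =>
    intro i acc hik
    rw [PySem.List.pyRange_one_cons (by omega : (i:Int) < (m:Int)-1)]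
    simp only [List.foldl_cons]
    rw [rollHash cs i]
    rw [show ((i:Int)+1) = ((i+1 : Nat):Int) by push_cast; ring]
    rw [ih (i+1) (acc ++ [wSum cs (i+1) % 10007]) (by omega)]
    rw [show i+1+k = i+(k+1) by omega]
    rw [List.append_assoc, List.range_succ_eq_map, List.map_cons, List.map_map]
    simp only [List.singleton_append, Nat.add_zero, Function.comp_def, Nat.succ_eq_add_one,
      show ∀ t, i+1+1+t = i+1+(t+1) from fun t => by omega]

theorem make_hashes_alt_eq_spec (s : String) : make_hashes_alt s = hashSpec s.toList := by
  simp only [make_hashes_alt]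
  by_cases hle : ((s.toList.length : Int) - 5) ≤ 0
  · rw [if_pos hle]
    unfold hashSpec
    rw [show s.toList.length - 5 = 0 by omega]
    simp
  · rw [if_neg hle]
    obtain ⟨m, hm⟩ : ∃ m : Nat, s.toList.length = (m+1) + 5 := ⟨s.toList.length - 6, by omega⟩
    rw [firstWin]
    rw [PySem.Int.mod_eq_emod_of_pos (by norm_num : (0:Int) < 10007)]
    rw [show ((s.toList.length : Int) - 5 - 1) = (((m+1):Nat):Int) - 1 by rw [hm]; push_cast; ring]
    have hB := Bloop s.toList (m+1) m 0 [wSum s.toList 0 % 10007] (by omega)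
    simp only [Nat.cast_zero] at hB
    rw [hB]
    unfold hashSpec
    rw [show s.toList.length - 5 = m+1 by omega]
    rw [List.range_succ_eq_map, List.map_cons, List.map_map]
    simp only [List.singleton_append, Function.comp_def, Nat.succ_eq_add_one,
      show ∀ t : Nat, 0+1+t = t+1 from fun t => by omega]

-- ===== VERDICT (by name: the statement is the Claim_ definition above) =====
theorem make_hashes_spec : Claim_equal_make_hashes := by
  intro s _
  unfold Spec_make_hashes
  rw [make_hashes_eq_spec, make_hashes_alt_eq_spec]
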